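-- pv_equiv track=rewrite | github.com/hivdb/chatpaper | src/prepare_eval_file/translate_answer/reduce_AI_reply.py | get_yes_reply
-- ===== SOURCE A (Python) =====
-- def get_yes_reply(reply_list):
--     yes_list = [
--         i
--         for i in reply_list
--         if i['AI_answer'] == 'Yes'
--     ]
--
--     if yes_list:
--         yes_list.sort(key=lambda x: len(x['AI_reply']), reverse=True)
--         return yes_list[:1]
--     else:
--         return reply_list
-- ===== SOURCE B (Python) =====
-- def get_yes_reply(reply_list):
--     # Single linear pass tracking the first longest-reply 'Yes' item (no filter list, no sort).
--     best = None
--     for i in reply_list: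
--         if i['AI_answer'] == 'Yes':
--             if best is None or len(best['AI_reply']) < len(i['AI_reply']):
--                 best = i
--     return reply_list if best is None else [best]
-- ===== Notes on version B (the rewrite author's own statement) =====
-- stated objective: faster
-- what changed: Replaces build-filter-list + stable reverse sort + slice with a single linear pass that keeps the first 'Yes' item of maximal AI_reply length.
import Mathlib
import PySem

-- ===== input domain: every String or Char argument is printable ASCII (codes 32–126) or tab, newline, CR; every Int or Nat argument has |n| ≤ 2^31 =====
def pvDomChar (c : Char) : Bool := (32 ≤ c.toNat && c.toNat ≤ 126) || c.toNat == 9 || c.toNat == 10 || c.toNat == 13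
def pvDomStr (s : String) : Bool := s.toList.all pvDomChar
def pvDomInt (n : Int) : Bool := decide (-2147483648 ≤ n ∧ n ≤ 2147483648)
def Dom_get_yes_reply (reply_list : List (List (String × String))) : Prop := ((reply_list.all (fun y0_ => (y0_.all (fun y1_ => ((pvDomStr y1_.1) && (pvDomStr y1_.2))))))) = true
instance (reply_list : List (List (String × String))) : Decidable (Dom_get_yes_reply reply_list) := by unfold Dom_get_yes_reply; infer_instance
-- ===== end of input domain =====

-- B replaces A's filter + stable reverse sort + [:1] slice by one linear pass keeping the
-- first 'Yes' item of maximal AI_reply length (O(n) instead of O(n log n)); return value only.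

-- first-match lookup in an association list = Python dict access d[k] (None = KeyError)
def pyLookup (d : List (String × String)) (k : String) : Option String :=
  (d.find? (fun p => p.1 == k)).map (fun p => p.2)

-- ===== PORT A =====
def get_yes_reply (reply_list : List (List (String × String))) : List (List (String × String)) :=
  let yes_list := reply_list.filter (fun i => pyLookup i "AI_answer" == some "Yes")
  if yes_list ≠ [] then
    PySem.List.slice
      (PySem.List.sorted yes_list (fun x => PySem.Str.len ((pyLookup x "AI_reply").getD "")) true)
      none (some 1)
  else
    reply_list

-- ===== PORT B =====
def get_yes_reply_alt (reply_list : List (List (String × String))) : List (List (String × String)) :=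
  let best := reply_list.foldl (fun best i =>
    if pyLookup i "AI_answer" == some "Yes" then
      match best with
      | none => some i
      | some m =>
        if PySem.Str.len ((pyLookup m "AI_reply").getD "") < PySem.Str.len ((pyLookup i "AI_reply").getD "") then
          some i
        else some m
    else best) none
  match best with
  | none => reply_list
  | some m => [m]

-- ===== PRECONDITION & SPEC =====
-- Pre_ excludes exactly the inputs where the Python raises KeyError: a dict missing
-- 'AI_answer', or a 'Yes' dict missing 'AI_reply' while some 'Yes' dict exists.
def Pre_get_yes_reply (reply_list : List (List (String × String))) : Prop :=
  (∀ d ∈ reply_list, (pyLookup d "AI_answer").isSome ∧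
    (pyLookup d "AI_answer" = some "Yes" → (pyLookup d "AI_reply").isSome))
instance (reply_list : List (List (String × String))) : Decidable (Pre_get_yes_reply reply_list) := by unfold Pre_get_yes_reply; infer_instance
def pvWitness_get_yes_reply : (List (List (String × String))) :=
  [[("AI_answer", "Yes"), ("AI_reply", "because")], [("AI_answer", "No"), ("AI_reply", "x")]]

def Spec_get_yes_reply (reply_list : List (List (String × String))) (out : List (List (String × String))) : Prop := out = get_yes_reply_alt reply_list
instance (reply_list : List (List (String × String))) (out : List (List (String × String))) : Decidable (Spec_get_yes_reply reply_list out) := by unfold Spec_get_yes_reply; infer_instance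

-- ===== CLAIM (what is proved, stated in full; the proofs are below) =====
def Claim_equal_get_yes_reply : Prop := ∀ (reply_list : List (List (String × String))), Dom_get_yes_reply reply_list → Pre_get_yes_reply reply_list → Spec_get_yes_reply reply_list (get_yes_reply reply_list)

-- ===== LEMMAS AND PROOFS =====

-- The head of a stable reverse sort is the first element of maximal key: head? ∘ sorted-rev = max?.
theorem head?_foldl_insertBy_rev {α κ : Type} [LinearOrder κ] (key : α → κ) (xs : List α) (acc : List α) :
    (xs.foldl (fun a x => PySem.List.insertBy (fun a b => decide (key b < key a)) x a) acc).head?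
      = xs.foldl (fun m x =>
          match m with
          | none => some x
          | some m => if key m < key x then some x else some m) acc.head? := by
  induction xs generalizing acc with
  | nil => rfl
  | cons x xs ih =>
    simp only [List.foldl_cons]
    rw [ih]
    congr 1
    cases acc with
    | nil => rfl
    | cons y ys =>
      simp only [PySem.List.insertBy]
      split <;> simp_all

theorem head?_sorted_rev {α κ : Type} [LinearOrder κ] (key : α → κ) (xs : List α) :
    (PySem.List.sorted xs key true).head? = PySem.List.max? xs key := by
  simpa [PySem.List.sorted, PySem.List.max?] using head?_foldl_insertBy_rev key xs []

-- ===== VERDICT (by name: the statement is the Claim_ definition above) =====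
theorem get_yes_reply_spec : Claim_equal_get_yes_reply := by
  intro l _ _
  unfold Spec_get_yes_reply get_yes_reply get_yes_reply_alt
  rw [show (l.foldl (fun best i =>
    if pyLookup i "AI_answer" == some "Yes" then
      match best with
      | none => some i
      | some m =>
        if PySem.Str.len ((pyLookup m "AI_reply").getD "") < PySem.Str.len ((pyLookup i "AI_reply").getD "") then
          some i
        else some m
    else best) none)
    = ((l.filter (fun i => pyLookup i "AI_answer" == some "Yes")).foldl (fun best i =>
      match best with
      | none => some i
      | some m =>
        if PySem.Str.len ((pyLookup m "AI_reply").getD "") < PySem.Str.len ((pyLookup i "AI_reply").getD "") then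
          some i
        else some m) none)
    from (List.foldl_filter ..).symm]
  set ys := l.filter (fun i => pyLookup i "AI_answer" == some "Yes") with hys
  have hmax : ys.foldl (fun m i =>
      match m with
      | none => some i
      | some m =>
        if PySem.Str.len ((pyLookup m "AI_reply").getD "") < PySem.Str.len ((pyLookup i "AI_reply").getD "") then
          some i
        else some m) none
      = PySem.List.max? ys (fun x => PySem.Str.len ((pyLookup x "AI_reply").getD "")) := by
    simp only [PySem.List.max?]
    congr 1
    funext m x
    cases m <;> simp
  rw [hmax]
  by_cases h : ys = []
  · simp [h, PySem.List.max?]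
  · have hsne : PySem.List.sorted ys (fun x => PySem.Str.len ((pyLookup x "AI_reply").getD "")) true ≠ [] := by
      simpa [PySem.List.sorted_eq_nil_iff] using h
    obtain ⟨m, t, hmt⟩ := List.exists_cons_of_ne_nil hsne
    have hmx : PySem.List.max? ys (fun x => PySem.Str.len ((pyLookup x "AI_reply").getD "")) = some m := by
      rw [← head?_sorted_rev, hmt]; rfl
    have hsl : PySem.List.slice
        (PySem.List.sorted ys (fun x => PySem.Str.len ((pyLookup x "AI_reply").getD "")) true)
        none (some 1) = [m] := by
      rw [hmt, PySem.List.slice_to (xs := m :: t) (b := 1) (by norm_num)]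
      rfl
    simp only [hmx, hsl]
    simp [h]
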